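-- pv_equiv track=rewrite | github.com/MateDominguez/CS | Algo1/guia8.py | longitudes_palabras
-- ===== SOURCE A (Python) =====
-- def longitudes_palabras(palabras: list[str]) -> list[int]:
--   longitudes: list[int] = list()
--   for palabra in palabras:
--     longitud = 0
--     for caracter in palabra:
--       longitud += 1
--     longitudes.append(longitud)
--   return longitudes
-- ===== SOURCE B (Python) =====
-- def longitudes_palabras(palabras: list[str]) -> list[int]:
--   return list(map(len, palabras))
-- ===== Notes on version B (the rewrite author's own statement) =====
-- stated objective: idiomatic
-- what changed: A's accumulator loop with a nested character-counting inner loop is replaced by a single map of len over the list: no inner per-character pass and no explicit accumulator at all.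
import Mathlib
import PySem

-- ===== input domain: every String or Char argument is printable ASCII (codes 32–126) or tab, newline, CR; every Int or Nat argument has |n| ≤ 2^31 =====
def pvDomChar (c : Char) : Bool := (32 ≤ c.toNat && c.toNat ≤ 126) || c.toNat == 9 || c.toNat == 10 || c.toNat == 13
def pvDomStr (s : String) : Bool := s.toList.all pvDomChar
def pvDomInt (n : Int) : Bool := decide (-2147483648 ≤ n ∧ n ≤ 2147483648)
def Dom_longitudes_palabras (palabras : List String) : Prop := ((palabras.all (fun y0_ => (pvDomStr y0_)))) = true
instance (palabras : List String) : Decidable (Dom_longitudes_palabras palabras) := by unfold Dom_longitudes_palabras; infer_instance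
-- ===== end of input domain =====

-- B replaces A's accumulator loop with its nested character-counting inner loop by a single map of len over the words (idiomatic).
-- ===== PORT A =====
def longitudes_palabras (palabras : List String) : List Int :=
  palabras.foldl (fun longitudes palabra =>
    longitudes ++ [palabra.toList.foldl (fun longitud _ => longitud + 1) (0 : Int)]) []

-- ===== PORT B =====
def longitudes_palabras_alt (palabras : List String) : List Int :=
  palabras.map PySem.Str.len

-- ===== PRECONDITION & SPEC =====
def Spec_longitudes_palabras (palabras : List String) (out : List Int) : Prop := out = longitudes_palabras_alt palabras
instance (palabras : List String) (out : List Int) : Decidable (Spec_longitudes_palabras palabras out) := by unfold Spec_longitudes_palabras; infer_instance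

-- ===== CLAIM (what is proved, stated in full; the proofs are below) =====
def Claim_equal_longitudes_palabras : Prop := ∀ (palabras : List String), Dom_longitudes_palabras palabras → Spec_longitudes_palabras palabras (longitudes_palabras palabras)

-- ===== LEMMAS AND PROOFS =====
theorem count_chars_eq_len (s : String) :
    s.toList.foldl (fun longitud _ => longitud + 1) (0 : Int) = PySem.Str.len s := by
  simp [PySem.Str.len_eq]
  have h : ∀ (l : List Char) (a : Int), l.foldl (fun longitud _ => longitud + 1) a = a + l.length := by
    intro l; induction l with
    | nil => simp
    | cons x xs ih => intro a; simp [List.foldl, ih]; ring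
  simpa using h s.toList 0

theorem foldl_append_eq_map (palabras : List String) (acc : List Int) :
    palabras.foldl (fun longitudes palabra =>
      longitudes ++ [palabra.toList.foldl (fun longitud _ => longitud + 1) (0 : Int)]) acc
    = acc ++ palabras.map PySem.Str.len := by
  induction palabras generalizing acc with
  | nil => simp
  | cons p ps ih =>
      rw [List.foldl_cons, ih, count_chars_eq_len, List.map_cons]
      simp

-- ===== VERDICT =====
theorem longitudes_palabras_spec : Claim_equal_longitudes_palabras := by
  intro palabras _
  unfold Spec_longitudes_palabras longitudes_palabras longitudes_palabras_alt
  simpa using foldl_append_eq_map palabras []
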